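-- pv_equiv track=rewrite | github.com/Dashhhhhhhh/app-trail | game_actions.py | find_similar_item
-- ===== SOURCE A (Python) =====
-- def find_similar_item(target_item, scene_items):
--     """Find similar items that could be picked up"""
--     similar_items = {
--         "stick": ["branch", "twig", "wood"],
--         "stone": ["rock", "pebble", "boulder"],
--         "herb": ["plant", "flower"],
--         "berry": ["berries", "fruit"],
--         "mushroom": ["fungi", "fungus"],
--         "vine": ["creeper", "rope"],
--         "wood": ["log", "timber", "stick"],
--         "leaf": ["leaves", "foliage"],
--         "root": ["roots", "tuber"],
--         "bark": ["tree bark", "bark pieces"]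
--     }
--
--     # Convert target_item to singular form if plural
--     if target_item.endswith('s'):
--         target_item = target_item[:-1]
--
--     # First check if the target item exists as a key in scene_items
--     if target_item in scene_items:
--         return target_item
--
--     # Then check for similar items
--     for base_item, variants in similar_items.items():
--         if target_item in [base_item] + variants:
--             # Check if base item or any variant is in the scene
--             available_items = [item for item in [base_item] + variants
--                             if item in scene_items]
--             if available_items:
--                 return available_items[0]
--
--     return None
-- ===== SOURCE B (Python) =====
-- def find_similar_item(target_item, scene_items):
--     """Find similar items that could be picked up"""
--     similar_items = {
--         "stick": ["branch", "twig", "wood"],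
--         "stone": ["rock", "pebble", "boulder"],
--         "herb": ["plant", "flower"],
--         "berry": ["berries", "fruit"],
--         "mushroom": ["fungi", "fungus"],
--         "vine": ["creeper", "rope"],
--         "wood": ["log", "timber", "stick"],
--         "leaf": ["leaves", "foliage"],
--         "root": ["roots", "tuber"],
--         "bark": ["tree bark", "bark pieces"]
--     }
--
--     # Inverted index: term -> ordered list of candidate groups containing it
--     index = {}
--     for base_item, variants in similar_items.items():
--         group = [base_item] + variants
--         for term in group:
--             index.setdefault(term, []).append(group)
--
--     if target_item.endswith('s'):
--         target_item = target_item[:-1]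
--
--     if target_item in scene_items:
--         return target_item
--
--     for group in index.get(target_item, []):
--         for item in group:
--             if item in scene_items:
--                 return item
--
--     return None
-- ===== Notes on version B (the rewrite author's own statement) =====
-- stated objective: alternative
-- what changed: Replaces A's per-group membership test and per-group availability-list comprehension with an inverted index built once (term -> ordered list of candidate groups), then a direct index lookup followed by a first-match scan of each mapped group.
import Mathlib
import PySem

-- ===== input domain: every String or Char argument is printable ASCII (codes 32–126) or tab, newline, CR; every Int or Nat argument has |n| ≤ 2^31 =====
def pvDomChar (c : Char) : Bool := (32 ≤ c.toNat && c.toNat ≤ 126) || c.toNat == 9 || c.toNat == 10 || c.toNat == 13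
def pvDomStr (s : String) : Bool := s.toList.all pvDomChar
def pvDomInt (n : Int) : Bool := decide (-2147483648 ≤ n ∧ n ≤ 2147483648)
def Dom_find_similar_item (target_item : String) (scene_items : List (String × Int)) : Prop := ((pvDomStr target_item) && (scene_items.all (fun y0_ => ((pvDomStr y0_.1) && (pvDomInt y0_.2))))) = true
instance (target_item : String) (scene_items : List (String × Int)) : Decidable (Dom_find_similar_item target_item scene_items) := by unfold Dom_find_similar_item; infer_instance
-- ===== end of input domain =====

-- B replaces A's per-group scans by an inverted index (term -> ordered list of groups) built once, then a direct lookup; equivalent, no speed claim.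

-- ===== PORT A =====
-- the literal similar_items dict of both Pythons, as an ordered association list
def pvSimilar : List (String × List String) :=
  [("stick", ["branch", "twig", "wood"]),
   ("stone", ["rock", "pebble", "boulder"]),
   ("herb", ["plant", "flower"]),
   ("berry", ["berries", "fruit"]),
   ("mushroom", ["fungi", "fungus"]),
   ("vine", ["creeper", "rope"]),
   ("wood", ["log", "timber", "stick"]),
   ("leaf", ["leaves", "foliage"]),
   ("root", ["roots", "tuber"]),
   ("bark", ["tree bark", "bark pieces"])]

-- 'for base_item, variants in similar_items.items(): …' of A
def pvLoopA (t : String) (scene : List (String × Int)) : List (String × List String) → Option String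
  | [] => none
  | (base, variants) :: rest =>
      let grp := base :: variants
      if grp.contains t then
        let avail := grp.filter (fun item => scene.any (fun p => p.1 == item))
        match avail with
        | [] => pvLoopA t scene rest
        | x :: _ => some x
      else pvLoopA t scene rest

def find_similar_item (target_item : String) (scene_items : List (String × Int)) : Option String :=
  let t := if PySem.Str.endswith target_item "s" then PySem.Str.slice target_item none (some (-1)) else target_item
  if scene_items.any (fun p => p.1 == t) then some t
  else pvLoopA t scene_items pvSimilar

-- ===== PORT B =====
-- 'for term in group: index.setdefault(term, []).append(group)' of B
def pvAddTerms (grp : List String) (d : PySem.Dict String (List (List String))) : List String → PySem.Dict String (List (List String))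
  | [] => d
  | term :: rest => pvAddTerms grp (d.modify term [] (fun ls => ls ++ [grp])) rest

-- 'for base_item, variants in similar_items.items(): …' of B's index construction
def pvBuildIndex : List (String × List String) → PySem.Dict String (List (List String)) → PySem.Dict String (List (List String))
  | [], d => d
  | (base, variants) :: rest, d =>
      let grp := base :: variants
      pvBuildIndex rest (pvAddTerms grp d grp)

-- 'for item in group: if item in scene_items: return item'
def pvFirstInScene (scene : List (String × Int)) : List String → Option String
  | [] => none
  | item :: rest => if scene.any (fun p => p.1 == item) then some item else pvFirstInScene scene rest

-- 'for group in index.get(target_item, []): …'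
def pvScanGroups (scene : List (String × Int)) : List (List String) → Option String
  | [] => none
  | g :: gs =>
      match pvFirstInScene scene g with
      | some x => some x
      | none => pvScanGroups scene gs

def find_similar_item_alt (target_item : String) (scene_items : List (String × Int)) : Option String :=
  let idx := pvBuildIndex pvSimilar PySem.Dict.empty
  let t := if PySem.Str.endswith target_item "s" then PySem.Str.slice target_item none (some (-1)) else target_item
  if scene_items.any (fun p => p.1 == t) then some t
  else pvScanGroups scene_items (idx.getD t [])

-- ===== PRECONDITION & SPEC =====
def Spec_find_similar_item (target_item : String) (scene_items : List (String × Int)) (out : Option String) : Prop := out = find_similar_item_alt target_item scene_items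
instance (target_item : String) (scene_items : List (String × Int)) (out : Option String) : Decidable (Spec_find_similar_item target_item scene_items out) := by unfold Spec_find_similar_item; infer_instance

-- ===== CLAIM (what is proved, stated in full; the proofs are below) =====
def Claim_equal_find_similar_item : Prop := ∀ (target_item : String) (scene_items : List (String × Int)), Dom_find_similar_item target_item scene_items → Spec_find_similar_item target_item scene_items (find_similar_item target_item scene_items)

-- ===== LEMMAS AND PROOFS =====

theorem pvAddTerms_getD (grp : List String) (t : String) :
    ∀ (ts : List String) (d : PySem.Dict String (List (List String))), ts.Nodup →
      (pvAddTerms grp d ts).getD t [] = d.getD t [] ++ (if t ∈ ts then [grp] else []) := by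
  intro ts
  induction ts with
  | nil => intro d _; simp [pvAddTerms]
  | cons term rest ih =>
    intro d hnd
    rcases List.nodup_cons.mp hnd with ⟨hnot, hrest⟩
    simp only [pvAddTerms]
    rw [ih _ hrest, PySem.Dict.getD_modify]
    by_cases h : t = term
    · subst h
      simp [hnot]
    · simp [h, List.mem_cons]

theorem pvBuildIndex_getD (t : String) :
    ∀ (L : List (String × List String)) (d : PySem.Dict String (List (List String))),
      (∀ p ∈ L, (p.1 :: p.2).Nodup) →
      (pvBuildIndex L d).getD t [] =
        d.getD t [] ++ (L.filter (fun p => (p.1 :: p.2).contains t)).map (fun p => p.1 :: p.2) := by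
  intro L
  induction L with
  | nil => intro d _; simp [pvBuildIndex]
  | cons p rest ih =>
    intro d hnd
    obtain ⟨base, variants⟩ := p
    simp only [pvBuildIndex]
    rw [ih _ (fun q hq => hnd q (List.mem_cons_of_mem _ hq)),
        pvAddTerms_getD _ _ _ _ (hnd (base, variants) List.mem_cons_self),
        List.filter_cons]
    by_cases h : t ∈ base :: variants
    · have hc : (((base, variants).1 :: (base, variants).2).contains t) = true := by simpa using h
      rw [if_pos hc]
      simp [h]
    · have hc : (((base, variants).1 :: (base, variants).2).contains t) = false := by simpa using h
      rw [hc]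
      simp [h]

theorem pvFirstInScene_eq (scene : List (String × Int)) (g : List String) :
    pvFirstInScene scene g = (g.filter (fun item => scene.any (fun p => p.1 == item))).head? := by
  induction g with
  | nil => simp [pvFirstInScene]
  | cons x xs ih =>
    simp only [pvFirstInScene, List.filter_cons]
    by_cases h : scene.any (fun p => p.1 == x)
    · simp [h]
    · simp only [h] at *
      simp [ih]

theorem pvScan_eq_loop (t : String) (scene : List (String × Int)) :
    ∀ (L : List (String × List String)),
      pvScanGroups scene ((L.filter (fun p => (p.1 :: p.2).contains t)).map (fun p => p.1 :: p.2)) =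
        pvLoopA t scene L := by
  intro L
  induction L with
  | nil => simp [pvScanGroups, pvLoopA]
  | cons p rest ih =>
    obtain ⟨base, variants⟩ := p
    rw [List.filter_cons]
    by_cases h : ((base :: variants).contains t) = true
    · have hc : ((fun p => (p.1 :: p.2).contains t) ((base, variants) : String × List String)) = true := h
      rw [if_pos hc, List.map_cons]
      simp only [pvScanGroups, pvLoopA, h, if_true, pvFirstInScene_eq]
      cases hf : (base :: variants).filter (fun item => scene.any (fun p => p.1 == item)) with
      | nil => simpa [hf] using ih
      | cons x xs => simp
    · rw [if_neg h]
      simp only [pvLoopA, h, Bool.false_eq_true, if_false]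
      exact ih

-- ===== VERDICT (by name: the statement is the Claim_ definition above) =====
theorem find_similar_item_spec : Claim_equal_find_similar_item := by
  intro target_item scene_items _
  unfold Spec_find_similar_item find_similar_item find_similar_item_alt
  set t := if PySem.Str.endswith target_item "s" then PySem.Str.slice target_item none (some (-1)) else target_item with ht
  by_cases h : scene_items.any (fun p => p.1 == t)
  · simp [h]
  · simp only [h, Bool.false_eq_true, if_false]
    rw [pvBuildIndex_getD t pvSimilar PySem.Dict.empty (by decide)]
    rw [PySem.Dict.getD_empty]
    simp only [List.nil_append]
    exact (pvScan_eq_loop t scene_items pvSimilar).symm
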